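-- pv_equiv track=rewrite | github.com/MarsWilliams/practice | travis/cards.py | last_occurence_ala_travis
-- ===== SOURCE A (Python) =====
-- def last_occurence_ala_travis(string: str) -> str:
--
--     uniques = set()
--
--     last_occurences = []
--
--     for letter in reversed(string):
--         if letter not in uniques:
--             last_occurences.append(letter)
--             uniques.add(letter)
--
--     return ''.join(reversed(last_occurences))
-- ===== SOURCE B (Python) =====
-- def last_occurence_ala_travis(string: str) -> str:
--     last = {c: i for i, c in enumerate(string)}
--     return ''.join(c for i, c in enumerate(string) if last[c] == i)
-- ===== Notes on version B (the rewrite author's own statement) =====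
-- stated objective: alternative
-- what changed: Replaces A's reversed pass with a seen-set plus a final reversal by a forward pass: first build a dict mapping each character to its last index, then keep each character exactly at that index.
import Mathlib
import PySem

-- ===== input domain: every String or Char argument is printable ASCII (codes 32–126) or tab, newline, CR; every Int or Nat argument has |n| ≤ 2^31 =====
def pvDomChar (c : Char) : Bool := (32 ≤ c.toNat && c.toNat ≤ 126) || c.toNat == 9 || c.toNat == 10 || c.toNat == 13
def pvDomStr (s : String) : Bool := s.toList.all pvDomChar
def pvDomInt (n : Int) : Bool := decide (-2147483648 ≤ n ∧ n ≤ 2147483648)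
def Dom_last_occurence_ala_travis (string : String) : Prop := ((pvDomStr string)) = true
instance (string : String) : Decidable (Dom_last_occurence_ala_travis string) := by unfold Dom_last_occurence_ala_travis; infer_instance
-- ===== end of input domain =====

-- B replaces A's reversed pass with a seen-set (plus a final reversal) by a forward pass:
-- build a dict of each character's last index, then keep each character exactly there.

-- ===== PORT A =====
def last_occurence_ala_travis (string : String) : String :=
  let r := string.toList.reverse.foldl
    (fun (st : PySem.Set Char × List Char) letter =>
      if ¬ PySem.Set.contains st.1 letter then
        (PySem.Set.add st.1 letter, st.2 ++ [letter])
      else st)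
    (PySem.Set.empty, [])
  String.ofList r.2.reverse

-- ===== PORT B =====
def last_occurence_ala_travis_alt (string : String) : String :=
  let chars := string.toList
  let last := (PySem.List.enumerate chars).foldl
    (fun (d : PySem.Dict Char Int) p => d.insert p.2 p.1) PySem.Dict.empty
  String.ofList (((PySem.List.enumerate chars).filter
    (fun p => last.get? p.2 == some p.1)).map (·.2))

-- ===== PRECONDITION & SPEC =====
def Spec_last_occurence_ala_travis (string : String) (out : String) : Prop := out = last_occurence_ala_travis_alt string
instance (string : String) (out : String) : Decidable (Spec_last_occurence_ala_travis string out) := by unfold Spec_last_occurence_ala_travis; infer_instance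

-- ===== CLAIM (what is proved, stated in full; the proofs are below) =====
def Claim_equal_last_occurence_ala_travis : Prop := ∀ (string : String), Dom_last_occurence_ala_travis string → Spec_last_occurence_ala_travis string (last_occurence_ala_travis string)

-- ===== LEMMAS AND PROOFS =====

-- common characterization: keep each char iff it does not recur later
def pvKeep : List Char → List Char
  | [] => []
  | x :: t => (if x ∈ t then [] else [x]) ++ pvKeep t

def pvStepA (st : PySem.Set Char × List Char) (letter : Char) : PySem.Set Char × List Char :=
  if ¬ PySem.Set.contains st.1 letter then
    (PySem.Set.add st.1 letter, st.2 ++ [letter])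
  else st

lemma pvA_fst_mem (ys : List Char) (c : Char) : ∀ (u : PySem.Set Char) (a : List Char),
    c ∈ (ys.foldl pvStepA (u, a)).1 ↔ c ∈ u ∨ c ∈ ys := by
  induction ys with
  | nil => intro u a; simp
  | cons y ys ih =>
    intro u a
    rw [List.foldl_cons]
    by_cases h : PySem.Set.contains u y = true
    · have hy : y ∈ u := (PySem.Set.contains_iff u y).mp h
      rw [show pvStepA (u, a) y = (u, a) from if_neg (not_not_intro h)]
      rw [ih]
      simp only [List.mem_cons]
      constructor
      · tauto
      · rintro (hc | rfl | hc) <;> tauto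
    · rw [show pvStepA (u, a) y = (PySem.Set.add u y, a ++ [y]) from if_pos h]
      rw [ih, PySem.Set.mem_add]
      simp only [List.mem_cons]
      constructor
      · rintro ((hc | rfl) | hc) <;> tauto
      · rintro (hc | rfl | hc) <;> tauto

lemma pvA_eq_keep (cs : List Char) :
    (cs.reverse.foldl pvStepA (PySem.Set.empty, [])).2.reverse = pvKeep cs := by
  induction cs with
  | nil => simp [pvKeep, PySem.Set.empty]
  | cons x t ih =>
    rw [List.reverse_cons, List.foldl_append, List.foldl_cons, List.foldl_nil]
    by_cases h : x ∈ t
    · have hc : PySem.Set.contains (t.reverse.foldl pvStepA (PySem.Set.empty, [])).1 x = true := by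
        rw [PySem.Set.contains_iff, pvA_fst_mem]
        right; simpa using h
      rw [show pvStepA (t.reverse.foldl pvStepA (PySem.Set.empty, [])) x
          = t.reverse.foldl pvStepA (PySem.Set.empty, []) from if_neg (not_not_intro hc)]
      rw [ih, pvKeep, if_pos h, List.nil_append]
    · have hc : ¬ PySem.Set.contains (t.reverse.foldl pvStepA (PySem.Set.empty, [])).1 x = true := by
        rw [PySem.Set.contains_iff, pvA_fst_mem]
        simp [PySem.Set.empty, h]
      rw [show pvStepA (t.reverse.foldl pvStepA (PySem.Set.empty, [])) x
          = ((t.reverse.foldl pvStepA (PySem.Set.empty, [])).1.add x,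
             (t.reverse.foldl pvStepA (PySem.Set.empty, [])).2 ++ [x]) from if_pos hc]
      simp only [List.reverse_append, List.reverse_singleton, List.singleton_append]
      rw [ih, pvKeep, if_neg h, List.singleton_append]

-- last occurrence index of c in t, counting from s (none if absent)
def pvMyLast : List Char → Int → Char → Option Int
  | [], _, _ => none
  | x :: t, s, c => (pvMyLast t (s + 1) c).or (if x = c then some s else none)

lemma pvMyLast_none (c : Char) : ∀ (t : List Char) (s : Int), c ∉ t → pvMyLast t s c = none := by
  intro t
  induction t with
  | nil => intro s _; rfl
  | cons x t ih =>
    intro s h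
    rw [List.mem_cons, not_or] at h
    unfold pvMyLast
    rw [ih (s + 1) h.2, if_neg (fun hx => h.1 hx.symm), Option.none_or]

lemma pvMyLast_isSome (c : Char) : ∀ (t : List Char) (s : Int), c ∈ t → (pvMyLast t s c).isSome := by
  intro t
  induction t with
  | nil => intro s h; cases h
  | cons x t ih =>
    intro s h
    unfold pvMyLast
    by_cases hm : c ∈ t
    · cases hv : pvMyLast t (s + 1) c with
      | none => exact absurd hv (by simpa [Option.isSome_iff_ne_none] using ih (s + 1) hm)
      | some j => simp
    · have hx : x = c := by
        rcases List.mem_cons.mp h with h' | h'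
        · exact h'.symm
        · exact absurd h' hm
      rw [pvMyLast_none c t (s + 1) hm, if_pos hx]
      rfl

lemma pvMyLast_ge (c : Char) : ∀ (t : List Char) (s j : Int), pvMyLast t s c = some j → s ≤ j := by
  intro t
  induction t with
  | nil => intro s j h; cases h
  | cons x t ih =>
    intro s j h
    unfold pvMyLast at h
    cases hv : pvMyLast t (s + 1) c with
    | some j' =>
      rw [hv, Option.some_or] at h
      have hj := ih (s + 1) j' hv
      have hjj : j' = j := Option.some.inj h
      omega
    | none =>
      rw [hv, Option.none_or] at h
      split at h
      · exact le_of_eq (Option.some.inj h)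
      · cases h

lemma pvMyLast_append (c : Char) (b : List Char) : ∀ (a : List Char) (s : Int),
    pvMyLast (a ++ b) s c = (pvMyLast b (s + a.length) c).or (pvMyLast a s c) := by
  intro a
  induction a with
  | nil => intro s; simp [pvMyLast]
  | cons x a ih =>
    intro s
    rw [List.cons_append]
    rw [show pvMyLast (x :: (a ++ b)) s c
        = (pvMyLast (a ++ b) (s + 1) c).or (if x = c then some s else none) from rfl]
    rw [show pvMyLast (x :: a) s c
        = (pvMyLast a (s + 1) c).or (if x = c then some s else none) from rfl]
    rw [ih (s + 1), Option.or_assoc]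
    rw [show s + 1 + (a.length : Int) = s + ((x :: a).length : Int) by
      simp [List.length_cons]; ring]

lemma pvDict_get (c : Char) : ∀ (cs : List Char) (s : Int) (d : PySem.Dict Char Int),
    ((PySem.List.enumerate cs s).foldl
      (fun (d : PySem.Dict Char Int) p => d.insert p.2 p.1) d).get? c
    = (pvMyLast cs s c).or (d.get? c) := by
  intro cs
  induction cs with
  | nil => intro s d; simp [PySem.List.enumerate, pvMyLast]
  | cons x cs ih =>
    intro s d
    rw [PySem.List.enumerate_cons, List.foldl_cons, ih (s + 1)]
    rw [show pvMyLast (x :: cs) s c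
        = (pvMyLast cs (s + 1) c).or (if x = c then some s else none) from rfl]
    rw [Option.or_assoc]
    congr 1
    rw [PySem.Dict.get?_insert]
    by_cases hxc : c = x
    · simp [hxc]
    · simp [hxc, Ne.symm hxc]

-- the filter predicate of B at a position k with suffix x :: t' decides x ∉ t'
lemma pvB_pred (cs : List Char) (x : Char) (t' : List Char) (k : Nat)
    (hk : cs.drop k = x :: t') :
    (((PySem.List.enumerate cs 0).foldl
        (fun (d : PySem.Dict Char Int) p => d.insert p.2 p.1) PySem.Dict.empty).get? x
      == some (k : Int)) = decide (x ∉ t') := by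
  have hklen : k ≤ cs.length := by
    by_contra h
    rw [List.drop_eq_nil_of_le (by omega)] at hk
    cases hk
  have hsplit : cs = cs.take k ++ (x :: t') := by rw [← hk, List.take_append_drop]
  have hlen : (cs.take k).length = k := by simp [hklen]
  rw [pvDict_get, PySem.Dict.get?_empty, Option.or_none]
  rw [show pvMyLast cs 0 x = pvMyLast (cs.take k ++ (x :: t')) 0 x from by rw [← hsplit]]
  rw [pvMyLast_append, hlen, zero_add]
  rw [show pvMyLast (x :: t') (k : Int) x
      = (pvMyLast t' ((k : Int) + 1) x).or (some (k : Int)) from by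
    rw [show pvMyLast (x :: t') (k : Int) x
        = (pvMyLast t' ((k : Int) + 1) x).or (if x = x then some (k : Int) else none) from rfl]
    rw [if_pos rfl]]
  by_cases h : x ∈ t'
  · cases hv : pvMyLast t' ((k : Int) + 1) x with
    | none =>
      exfalso
      have hs := pvMyLast_isSome x t' ((k : Int) + 1) h
      rw [hv] at hs
      cases hs
    | some j =>
      have hj : (k : Int) + 1 ≤ j := pvMyLast_ge x t' ((k : Int) + 1) j hv
      rw [Option.some_or, Option.some_or,
        show (some j == some ((k : Nat) : Int)) = false from by
          simp only [beq_eq_false_iff_ne, ne_eq, Option.some.injEq]; omega]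
      simp [h]
  · rw [pvMyLast_none x t' ((k : Int) + 1) h, Option.none_or, Option.some_or]
    simp [h]

lemma pvB_shift (cs : List Char) : ∀ (t : List Char) (k : Nat), cs.drop k = t →
    ((PySem.List.enumerate t (k : Int)).filter
      (fun p => ((PySem.List.enumerate cs 0).foldl
          (fun (d : PySem.Dict Char Int) p => d.insert p.2 p.1) PySem.Dict.empty).get? p.2
        == some p.1)).map (·.2)
    = pvKeep t := by
  intro t
  induction t with
  | nil => intro k _; simp [PySem.List.enumerate, pvKeep]
  | cons x t' ih =>
    intro k hk
    have hdrop : cs.drop (k + 1) = t' := by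
      have := congrArg (List.drop 1) hk
      simpa [List.drop_drop, Nat.add_comm] using this
    have ih' := ih (k + 1) hdrop
    rw [show (((k : Nat) + 1 : Nat) : Int) = (k : Int) + 1 by push_cast; ring] at ih'
    rw [PySem.List.enumerate_cons, List.filter_cons]
    have hpred := pvB_pred cs x t' k hk
    by_cases h : x ∈ t'
    · rw [show (((PySem.List.enumerate cs 0).foldl
          (fun (d : PySem.Dict Char Int) p => d.insert p.2 p.1) PySem.Dict.empty).get? x
          == some (k : Int)) = false from by rw [hpred]; simp [h]]
      rw [if_neg Bool.false_ne_true]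
      rw [ih', pvKeep, if_pos h, List.nil_append]
    · rw [show (((PySem.List.enumerate cs 0).foldl
          (fun (d : PySem.Dict Char Int) p => d.insert p.2 p.1) PySem.Dict.empty).get? x
          == some (k : Int)) = true from by rw [hpred]; simp [h]]
      rw [if_pos rfl, List.map_cons, ih', pvKeep, if_neg h, List.singleton_append]

-- ===== VERDICT (by name: the statement is the Claim_ definition above) =====
theorem last_occurence_ala_travis_spec : Claim_equal_last_occurence_ala_travis := by
  intro s _
  show _ = _
  unfold last_occurence_ala_travis last_occurence_ala_travis_alt
  simp only []
  rw [show s.toList.reverse.foldl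
      (fun (st : PySem.Set Char × List Char) letter =>
        if ¬ PySem.Set.contains st.1 letter then
          (PySem.Set.add st.1 letter, st.2 ++ [letter])
        else st) (PySem.Set.empty, []) = s.toList.reverse.foldl pvStepA (PySem.Set.empty, []) from rfl]
  rw [pvA_eq_keep, ← pvB_shift s.toList s.toList 0 (by simp)]
  norm_num
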